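-- pv_equiv track=rewrite | github.com/sloumdrone/Inky | qt-work-version/MyWiki/myWiki.py | swapScript
-- ===== SOURCE A (Python) =====
-- def swapScript(string,direction='FromHTML'):
--     #Direction takes: 'FromHTML' and any other value (to go ToHTML)
--     #Swaps html for wikiCode and vice versa
--     tags = [
--     ['<b>','[b: '],['</b>',' :b]'],
--     ['<i>','[i: '],['</i>',' :i]'],
--     ['<sub>','[s: '],['</sub>',' :s]'],
--     ['<sup>','[S: '],['</sup>',' :S]'],
--     ['<blockquote>','[q: '],['</blockquote>',' :q]'],
--     ['<p>','[p: '],['</p>',' :p]'],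
--     ['<h3>','[h: '],['</h3><hr>',' :h]'],
--     ['<ul>','[L: '],['</ul',' :L]'],
--     ['<li>','[l: '],['</li>',' :l]'],
--     ['<br>','[n: ']
--     ]
--
--     for x in tags:
--         if direction == 'FromHTML':
--             string = string.replace(x[0],x[1])
--         else:
--             string = string.replace(x[1],x[0])
--     return string
-- ===== SOURCE B (Python) =====
-- def swapScript(string, direction='FromHTML'):
--     # Build the 19-pair table from a compact per-tag spec (with the two quirky
--     # closers kept verbatim), then rewrite in ONE left-to-right scan: at each
--     # position the first matching source is substituted, instead of A's 19
--     # sequential full-string replace passes.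
--     spec = [('b', 'b'), ('i', 'i'), ('sub', 's'), ('sup', 'S'),
--             ('blockquote', 'q'), ('p', 'p'), ('h3', 'h'), ('ul', 'L'),
--             ('li', 'l')]
--     table = []
--     for tag, code in spec:
--         if tag == 'h3':
--             close = '</h3><hr>'
--         elif tag == 'ul':
--             close = '</ul'
--         else:
--             close = '</' + tag + '>'
--         table.append(('<' + tag + '>', '[' + code + ': '))
--         table.append((close, ' :' + code + ']'))
--     table.append(('<br>', '[n: '))
--     if direction != 'FromHTML':
--         table = [(w, h) for h, w in table]
--     out = []
--     i = 0
--     n = len(string)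
--     while i < n:
--         for src, dst in table:
--             if string.startswith(src, i):
--                 out.append(dst)
--                 i += len(src)
--                 break
--         else:
--             out.append(string[i])
--             i += 1
--     return ''.join(out)
-- ===== Notes on version B (the rewrite author's own statement) =====
-- stated objective: alternative
-- what changed: B generates the 19-pair substitution table from a compact per-tag spec (keeping the two quirky closers verbatim) and rewrites the string in a single left-to-right scan where the first matching source wins, instead of A's 19 sequential full-string replace passes over a literal pair list.
-- outside the precondition, e.g. on swapScript('[i: :b]', 'ToHTML'): A returns '[i:</b>', B returns '<i>:b]'
import Mathlib
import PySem

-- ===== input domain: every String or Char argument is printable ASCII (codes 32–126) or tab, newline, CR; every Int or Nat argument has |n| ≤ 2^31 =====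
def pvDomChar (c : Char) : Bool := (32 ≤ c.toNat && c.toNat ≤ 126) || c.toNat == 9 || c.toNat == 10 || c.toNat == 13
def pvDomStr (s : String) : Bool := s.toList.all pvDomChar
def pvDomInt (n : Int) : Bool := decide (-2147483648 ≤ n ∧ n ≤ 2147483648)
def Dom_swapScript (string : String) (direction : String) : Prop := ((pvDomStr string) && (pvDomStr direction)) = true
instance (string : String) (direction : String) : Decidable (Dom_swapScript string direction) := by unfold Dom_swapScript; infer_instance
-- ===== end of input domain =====

-- B generates the substitution table from a compact per-tag spec and rewrites the
-- string in one left-to-right scan, instead of A's 19 sequential full-string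
-- replace passes over a literal pair list (objective: alternative algorithm).

-- ===== PORT A =====
-- the 19 [html, wikiCode] pairs of A's `tags` list
def pvTags : List (String × String) := [
  ("<b>", "[b: "), ("</b>", " :b]"),
  ("<i>", "[i: "), ("</i>", " :i]"),
  ("<sub>", "[s: "), ("</sub>", " :s]"),
  ("<sup>", "[S: "), ("</sup>", " :S]"),
  ("<blockquote>", "[q: "), ("</blockquote>", " :q]"),
  ("<p>", "[p: "), ("</p>", " :p]"),
  ("<h3>", "[h: "), ("</h3><hr>", " :h]"),
  ("<ul>", "[L: "), ("</ul", " :L]"),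
  ("<li>", "[l: "), ("</li>", " :l]"),
  ("<br>", "[n: ")]

def swapScript (string : String) (direction : String) : String :=
  pvTags.foldl
    (fun s x =>
      if direction == "FromHTML" then PySem.Str.replace s x.1 x.2
      else PySem.Str.replace s x.2 x.1)
    string

-- ===== PORT B =====
-- Source B's compact per-tag `spec` (tag name, wiki-code letter); <br> handled apart
def pvSpec : List (String × String) :=
  [("b", "b"), ("i", "i"), ("sub", "s"), ("sup", "S"),
   ("blockquote", "q"), ("p", "p"), ("h3", "h"), ("ul", "L"), ("li", "l")]

-- Source B's `for tag, code in spec` loop building `table` (quirky closers verbatim)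
def pvBuildTable : List (String × String) :=
  (pvSpec.foldl (fun table x =>
    let close :=
      if x.1 == "h3" then "</h3><hr>"
      else if x.1 == "ul" then "</ul"
      else "</" ++ x.1 ++ ">"
    table ++ [("<" ++ x.1 ++ ">", "[" ++ x.2 ++ ": "), (close, " :" ++ x.2 ++ "]")]) [])
  ++ [("<br>", "[n: ")]

-- Source B's `while i < n` loop: at each position substitute the first table entry
-- whose source matches, else copy the character (fuel = number of chars left)
def pvScan (table : List (List Char × List Char)) : Nat → List Char → List Char
  | 0, _ => []
  | _ + 1, [] => []
  | fuel + 1, c :: t =>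
    match table.find? (fun pr => pr.1.isPrefixOf (c :: t)) with
    | some pr => pr.2 ++ pvScan table fuel ((c :: t).drop pr.1.length)
    | none => c :: pvScan table fuel t

def swapScript_alt (string : String) (direction : String) : String :=
  let base := pvBuildTable
  let table :=
    if direction != "FromHTML" then base.map (fun x => (x.2.toList, x.1.toList))
    else base.map (fun x => (x.1.toList, x.2.toList))
  String.ofList (pvScan table string.toList.length string.toList)

-- ===== PRECONDITION & SPEC =====
-- Pre_ excludes, for the ToHTML direction only, strings containing one of the 45
-- overlap patterns '[y: :x]' in which an opening wiki code and a closing wiki code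
-- of a pair listed EARLIER in the table share their middle space character: there
-- A resolves the overlap in favour of the code listed first in its table while B
-- resolves it in favour of the leftmost match — an accidental first-vs-last-match
-- corner of self-overlapping markup for which no behaviour is specified.
def pvBad : List String := [
  "[i: :b]", "[s: :b]", "[S: :b]", "[q: :b]", "[p: :b]", "[h: :b]", "[L: :b]",
  "[l: :b]", "[n: :b]", "[s: :i]", "[S: :i]", "[q: :i]", "[p: :i]", "[h: :i]",
  "[L: :i]", "[l: :i]", "[n: :i]", "[S: :s]", "[q: :s]", "[p: :s]", "[h: :s]",
  "[L: :s]", "[l: :s]", "[n: :s]", "[q: :S]", "[p: :S]", "[h: :S]", "[L: :S]",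
  "[l: :S]", "[n: :S]", "[p: :q]", "[h: :q]", "[L: :q]", "[l: :q]", "[n: :q]",
  "[h: :p]", "[L: :p]", "[l: :p]", "[n: :p]", "[L: :h]", "[l: :h]", "[n: :h]",
  "[l: :L]", "[n: :L]", "[n: :l]"]

def Pre_swapScript (string : String) (direction : String) : Prop :=
  direction = "FromHTML" ∨ ∀ b ∈ pvBad, PySem.Str.isIn b string = false

instance (string : String) (direction : String) : Decidable (Pre_swapScript string direction) := by
  unfold Pre_swapScript; infer_instance

def pvWitness_swapScript : String × String := ("<b>x</b>", "ToHTML")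

def Spec_swapScript (string : String) (direction : String) (out : String) : Prop :=
  out = swapScript_alt string direction
instance (string : String) (direction : String) (out : String) : Decidable (Spec_swapScript string direction out) := by
  unfold Spec_swapScript; infer_instance

-- ===== CLAIM (what is proved, stated in full; the proofs are below) =====
def Claim_equal_swapScript : Prop := ∀ (string : String) (direction : String), Dom_swapScript string direction → Pre_swapScript string direction → Spec_swapScript string direction (swapScript string direction)

-- ===== LEMMAS AND PROOFS =====

theorem pvGo_acc (old new : List Char) :
    ∀ fuel l acc, PySem.Chars.replace.go old new fuel l acc =
      acc.reverse ++ PySem.Chars.replace.go old new fuel l [] := by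
  intro fuel
  induction fuel with
  | zero => intro l acc; simp [PySem.Chars.replace.go]
  | succ f ih =>
    intro l acc
    cases l with
    | nil => simp [PySem.Chars.replace.go]
    | cons c t =>
      simp only [PySem.Chars.replace.go]
      split
      · rw [ih _ (new.reverse ++ acc), ih _ (new.reverse ++ [])]; simp
      · rw [ih _ (c :: acc), ih _ (c :: [])]; simp

theorem pvGo_fuel (old new : List Char) (hold : old ≠ []) :
    ∀ fuel, ∀ f ≤ fuel, ∀ l : List Char, l.length ≤ f →
      PySem.Chars.replace.go old new f l [] =
      PySem.Chars.replace.go old new l.length l [] := by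
  have holdlen : 1 ≤ old.length := by
    cases old with | nil => exact absurd rfl hold | cons _ _ => simp
  intro fuel
  induction fuel with
  | zero =>
    intro f hf l hl
    interval_cases f
    have : l = [] := List.eq_nil_of_length_eq_zero (Nat.le_zero.mp hl)
    subst this; rfl
  | succ n ih =>
    intro f hf l hl
    cases l with
    | nil =>
      cases f with
      | zero => rfl
      | succ f' => simp [PySem.Chars.replace.go]
    | cons c t =>
      cases f with
      | zero => simp at hl
      | succ f' =>
        simp only [PySem.Chars.replace.go, List.length_cons]
        split
        · rw [pvGo_acc old new f' _ (new.reverse ++ []), pvGo_acc old new t.length _ (new.reverse ++ [])]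
          have hdl : (List.drop old.length (c :: t)).length ≤ f' := by
            simp only [List.length_drop, List.length_cons]
            simp only [List.length_cons] at hl; omega
          rw [ih f' (by omega) _ hdl, ih t.length (by simp only [List.length_cons] at hl; omega) _
            (by simp only [List.length_drop, List.length_cons]; omega)]
        · rw [pvGo_acc old new f' t [c], pvGo_acc old new t.length t [c],
            ih f' (by omega) t (by simp only [List.length_cons] at hl; omega),
            ih t.length (by simp only [List.length_cons] at hl; omega) t le_rfl]

theorem pvReplace_nil (old new : List Char) (hold : old ≠ []) :
    PySem.Chars.replace [] old new = [] := by
  cases old with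
  | nil => exact absurd rfl hold
  | cons a b => simp [PySem.Chars.replace, PySem.Chars.replace.go]

theorem pvReplace_cons_miss (old new : List Char) (c : Char) (t : List Char)
    (hold : old ≠ []) (h : ¬ old <+: (c :: t)) :
    PySem.Chars.replace (c :: t) old new = c :: PySem.Chars.replace t old new := by
  have hie : old.isEmpty = false := by cases old with
    | nil => exact absurd rfl hold
    | cons a b => rfl
  simp only [PySem.Chars.replace, hie, Bool.false_eq_true, if_false, List.length_cons]
  simp only [PySem.Chars.replace.go]
  have hpf : old.isPrefixOf (c :: t) = false := by
    rw [Bool.eq_false_iff]; intro hc; exact h (List.isPrefixOf_iff_prefix.mp hc)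
  rw [hpf]
  simp only [Bool.false_eq_true, if_false]
  rw [pvGo_acc]
  rfl

theorem pvReplace_hit (old new : List Char) (s : List Char)
    (hold : old ≠ []) (h : old <+: s) :
    PySem.Chars.replace s old new =
      new ++ PySem.Chars.replace (s.drop old.length) old new := by
  have hie : old.isEmpty = false := by cases old with
    | nil => exact absurd rfl hold
    | cons a b => rfl
  have holdlen : 1 ≤ old.length := by
    cases old with | nil => exact absurd rfl hold | cons _ _ => simp
  cases s with
  | nil => exact absurd (List.prefix_nil.mp h) hold
  | cons c t =>
    simp only [PySem.Chars.replace, hie, Bool.false_eq_true, if_false, List.length_cons]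
    conv_lhs => rw [PySem.Chars.replace.go]
    have hpf : old.isPrefixOf (c :: t) = true := List.isPrefixOf_iff_prefix.mpr h
    rw [hpf]
    simp only [if_true]
    rw [pvGo_acc]
    rw [pvGo_fuel old new hold t.length t.length le_rfl _
      (by simp only [List.length_drop, List.length_cons]; omega)]
    simp

def pvApply (pairs : List (List Char × List Char)) (s : List Char) : List Char :=
  pairs.foldl (fun s pr => PySem.Chars.replace s pr.1 pr.2) s

def pvRcond (bad : List (List Char)) (x y : List Char) : Prop :=
  ¬ (y <+: x) ∧ ∀ i, i < y.length → 0 < i →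
    ¬ (x <+: y.drop i) ∧ (y.drop i <+: x → (y ++ x.drop (y.length - i)) ∈ bad)


theorem pvReflect1 (H : List Char) (old new : List Char) (hold : old ≠ [])
    (hh : ∃ h ∈ H, new.head? = some h) :
    ∀ u v, (∀ c ∈ v, c ∉ H) → v <+: PySem.Chars.replace u old new → v <+: u := by
  intro u
  induction u with
  | nil =>
    intro v _ hp
    rw [pvReplace_nil old new hold] at hp
    rw [List.prefix_nil.mp hp]
  | cons c t ih =>
    intro v hv hp
    by_cases ho : old <+: (c :: t)
    · rw [pvReplace_hit old new _ hold ho] at hp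
      cases v with
      | nil => exact List.nil_prefix
      | cons vc v' =>
        obtain ⟨h, hmem, hhead⟩ := hh
        cases new with
        | nil => simp at hhead
        | cons nh nt =>
          have hvc : vc = nh := by
            have := List.cons_prefix_cons.mp hp
            exact this.1
          simp only [List.head?_cons, Option.some.injEq] at hhead
          exact absurd hmem (by rw [← hhead, ← hvc]; exact fun hm => hv vc (by simp) hm)
    · rw [pvReplace_cons_miss old new c t hold ho] at hp
      cases v with
      | nil => exact List.nil_prefix
      | cons vc v' =>
        obtain ⟨hc, hp'⟩ := List.cons_prefix_cons.mp hp
        subst hc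
        exact List.cons_prefix_cons.mpr
          ⟨rfl, ih v' (fun x hx => hv x (by simp [hx])) hp'⟩

theorem pvSegHead (old new : List Char) (hold : old ≠ []) :
    ∀ a w, (∀ c ∈ a, old.head? ≠ some c) →
      PySem.Chars.replace (a ++ w) old new = a ++ PySem.Chars.replace w old new := by
  intro a
  induction a with
  | nil => intro w _; simp
  | cons c a ih =>
    intro w h
    have hnp : ¬ old <+: (c :: (a ++ w)) := by
      intro hp
      cases old with
      | nil => exact hold rfl
      | cons oh ot =>
        have : oh = c := (List.cons_prefix_cons.mp hp).1
        exact h c (by simp) (by simp [this])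
    rw [List.cons_append, pvReplace_cons_miss old new _ _ hold hnp,
      ih w (fun x hx => h x (by simp [hx]))]
    simp

theorem pvSegHeadF (L : List (List Char × List Char))
    (hL : ∀ pr ∈ L, pr.1 ≠ []) :
    ∀ a w, (∀ pr ∈ L, ∀ c ∈ a, pr.1.head? ≠ some c) →
      pvApply L (a ++ w) = a ++ pvApply L w := by
  induction L with
  | nil => intro a w _; simp [pvApply]
  | cons pr L ih =>
    intro a w h
    have step : pvApply (pr :: L) (a ++ w) = pvApply L (PySem.Chars.replace (a ++ w) pr.1 pr.2) := rfl
    rw [step, pvSegHead pr.1 pr.2 (hL pr (by simp)) a w (h pr (by simp))]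
    exact ih (fun x hx => hL x (by simp [hx])) a (PySem.Chars.replace w pr.1 pr.2)
      (fun x hx => h x (by simp [hx]))

theorem pvSegK (old new : List Char) (hold : old ≠ []) :
    ∀ pk w, (∀ i, i < pk.length → ¬ old <+: (pk.drop i ++ w)) →
      PySem.Chars.replace (pk ++ w) old new = pk ++ PySem.Chars.replace w old new := by
  intro pk
  induction pk with
  | nil => intro w _; simp
  | cons c pk ih =>
    intro w h
    have h0 : ¬ old <+: (c :: (pk ++ w)) := by
      have := h 0 (by simp)
      simpa using this
    rw [List.cons_append, pvReplace_cons_miss old new _ _ hold h0,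
      ih w (fun i hi => by
        have := h (i + 1) (by simp only [List.length_cons]; omega)
        simpa using this)]
    simp

theorem pvDropPre (a p w : List Char) (h1 : a <+: p) (h2 : p <+: a ++ w) :
    p.drop a.length <+: w := by
  obtain ⟨r, hr⟩ := h1
  subst hr
  rw [List.drop_left]
  obtain ⟨q, hq⟩ := h2
  rw [List.append_assoc] at hq
  exact ⟨q, List.append_cancel_left hq⟩


theorem pvL1 (H : List Char) (pairs : List (List Char × List Char))
    (h1 : ∀ pr ∈ pairs, pr.1 ≠ [] ∧ ∃ h ∈ H, pr.2.head? = some h)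
    (h2 : ∀ pr ∈ pairs, ∀ c ∈ pr.1, c ∉ H)
    (c : Char) :
    ∀ L, (∀ x ∈ L, x ∈ pairs) →
      ∀ t, (∀ pr ∈ pairs, ¬ pr.1 <+: (c :: t)) →
        pvApply L (c :: t) = c :: pvApply L t := by
  intro L
  induction L with
  | nil => intro _ t _; simp [pvApply]
  | cons x L ih =>
    intro hmem t hmiss
    have hx : x ∈ pairs := hmem x (by simp)
    have hx1 : x.1 ≠ [] := (h1 x hx).1
    have step : pvApply (x :: L) (c :: t) = pvApply L (PySem.Chars.replace (c :: t) x.1 x.2) := rfl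
    rw [step, pvReplace_cons_miss x.1 x.2 c t hx1 (hmiss x hx)]
    apply ih (fun y hy => hmem y (by simp [hy]))
    intro pr hpr hp
    have hpr1 : pr.1 ≠ [] := (h1 pr hpr).1
    cases hq : pr.1 with
    | nil => exact hpr1 hq
    | cons qh q' =>
      rw [hq] at hp
      obtain ⟨hqc, hq'⟩ := List.cons_prefix_cons.mp hp
      subst hqc
      have hq't : q' <+: t := by
        apply pvReflect1 H x.1 x.2 hx1 (h1 x hx).2 t q' ?_ hq'
        intro ch hch
        exact h2 pr hpr ch (by rw [hq]; simp [hch])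
      exact hmiss pr hpr (by rw [hq]; exact List.cons_prefix_cons.mpr ⟨rfl, hq't⟩)

theorem pvL2a (H : List Char) (pairs : List (List Char × List Char)) (bad : List (List Char))
    (h1 : ∀ pr ∈ pairs, pr.1 ≠ [] ∧ ∃ h ∈ H, pr.2.head? = some h)
    (h2 : ∀ pr ∈ pairs, ∀ c ∈ pr.1, c ∉ H)
    (pk : List Char) :
    ∀ L, (∀ x ∈ L, x ∈ pairs) → (∀ x ∈ L, pvRcond bad x.1 pk) → (∀ x ∈ L, ¬ x.1 <+: pk) →
      ∀ u, (∀ x ∈ L, ∀ i, i < pk.length → 0 < i →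
              ¬ (pk.drop i <+: x.1 ∧ x.1.drop (pk.length - i) <+: u)) →
        pvApply L (pk ++ u) = pk ++ pvApply L u := by
  intro L
  induction L with
  | nil => intro _ _ _ u _; simp [pvApply]
  | cons x L ih =>
    intro hmem hR hm0 u hb
    have hx : x ∈ pairs := hmem x (by simp)
    have hx1 : x.1 ≠ [] := (h1 x hx).1
    have step : pvApply (x :: L) (pk ++ u) = pvApply L (PySem.Chars.replace (pk ++ u) x.1 x.2) := rfl
    rw [step, pvSegK x.1 x.2 hx1 pk u ?hi]
    case hi =>
      intro i hilt hp
      rcases Nat.eq_zero_or_pos i with h0 | hipos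
      · subst h0
        simp only [List.drop_zero] at hp
        rcases List.prefix_or_prefix_of_prefix hp (List.prefix_append pk u) with hc | hc
        · exact hm0 x (by simp) hc
        · exact (hR x (by simp)).1 hc
      · have hcond := (hR x (by simp)).2 i hilt hipos
        by_cases hdp : pk.drop i <+: x.1
        · have hdrop : x.1.drop (pk.drop i).length <+: u := pvDropPre _ _ _ hdp hp
          rw [List.length_drop] at hdrop
          exact hb x (by simp) i hilt hipos ⟨hdp, hdrop⟩
        · rcases List.prefix_or_prefix_of_prefix hp (List.prefix_append (pk.drop i) u) with hc | hc
          · exact hcond.1 hc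
          · exact hdp hc
    have hrec : pvApply L (pk ++ PySem.Chars.replace u x.1 x.2) =
        pk ++ pvApply L (PySem.Chars.replace u x.1 x.2) := by
      apply ih (fun y hy => hmem y (by simp [hy])) (fun y hy => hR y (by simp [hy]))
        (fun y hy => hm0 y (by simp [hy]))
      rintro y hy i hilt hipos ⟨hdp, hdrop⟩
      have hrefl : y.1.drop (pk.length - i) <+: u := by
        apply pvReflect1 H x.1 x.2 hx1 (h1 x hx).2 u _ ?_ hdrop
        intro ch hch
        exact h2 y (hmem y (by simp [hy])) ch (List.mem_of_mem_drop hch)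
      exact hb y (by simp [hy]) i hilt hipos ⟨hdp, hrefl⟩
    rw [hrec]
    rfl

theorem pvScan_fuel (table : List (List Char × List Char))
    (hne : ∀ pr ∈ table, pr.1 ≠ []) :
    ∀ fuel, ∀ f ≤ fuel, ∀ u : List Char, u.length ≤ f →
      pvScan table f u = pvScan table u.length u := by
  intro fuel
  induction fuel with
  | zero =>
    intro f hf u hu
    interval_cases f
    have : u = [] := List.eq_nil_of_length_eq_zero (Nat.le_zero.mp hu)
    subst this; rfl
  | succ n ih =>
    intro f hf u hu
    cases u with
    | nil => cases f with
      | zero => rfl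
      | succ _ => rfl
    | cons c t =>
      cases f with
      | zero => simp at hu
      | succ f' =>
        simp only [List.length_cons] at hu
        simp only [pvScan, List.length_cons]
        cases hfind : table.find? (fun pr => pr.1.isPrefixOf (c :: t)) with
        | none =>
          simp only
          congr 1
          rw [ih f' (by omega) t (by omega), ih t.length (by omega) t le_rfl]
        | some pr =>
          simp only
          congr 1
          have hpr : pr ∈ table := List.mem_of_find?_eq_some hfind
          have hpk : pr.1 ≠ [] := hne pr hpr
          have hlen : 1 ≤ pr.1.length := by
            cases h : pr.1 with
            | nil => exact absurd h hpk
            | cons _ _ => simp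
          rw [ih f' (by omega) _ (by simp only [List.length_drop, List.length_cons]; omega),
            ih t.length (by omega) _ (by simp only [List.length_drop, List.length_cons]; omega)]

theorem pvApply_nil (pairs : List (List Char × List Char))
    (hne : ∀ pr ∈ pairs, pr.1 ≠ []) : pvApply pairs [] = [] := by
  induction pairs with
  | nil => rfl
  | cons pr L ih =>
    have step : pvApply (pr :: L) [] = pvApply L (PySem.Chars.replace [] pr.1 pr.2) := rfl
    rw [step, pvReplace_nil pr.1 pr.2 (hne pr (by simp))]
    exact ih (fun x hx => hne x (by simp [hx]))

theorem pvFindSplit {α : Type} (p : α → Bool) :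
    ∀ L : List α, ∀ a, L.find? p = some a →
      ∃ L₁ L₂, L = L₁ ++ a :: L₂ ∧ ∀ x ∈ L₁, p x = false := by
  intro L
  induction L with
  | nil => intro a h; simp at h
  | cons x L ih =>
    intro a h
    by_cases hp : p x
    · rw [List.find?_cons_of_pos hp] at h
      obtain rfl : x = a := by simpa using h
      exact ⟨[], L, by simp, by simp⟩
    · rw [List.find?_cons_of_neg (by simpa using hp)] at h
      obtain ⟨L₁, L₂, rfl, hall⟩ := ih a h
      refine ⟨x :: L₁, L₂, by simp, ?_⟩
      intro y hy
      rcases List.mem_cons.mp hy with rfl | hy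
      · simpa using hp
      · exact hall y hy

theorem pvMain (H : List Char) (pairs : List (List Char × List Char)) (bad : List (List Char))
    (h1 : ∀ pr ∈ pairs, pr.1 ≠ [] ∧ ∃ h ∈ H, pr.2.head? = some h)
    (h2 : ∀ pr ∈ pairs, ∀ c ∈ pr.1, c ∉ H)
    (h3 : ∀ pr ∈ pairs, ∀ c ∈ pr.2, ∀ qr ∈ pairs, qr.1.head? ≠ some c)
    (hP : pairs.Pairwise (fun x y => pvRcond bad x.1 y.1)) :
    ∀ s : List Char, (∀ b ∈ bad, ¬ b <:+: s) →
      pvApply pairs s = pvScan pairs s.length s := by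
  have hne : ∀ pr ∈ pairs, pr.1 ≠ [] := fun pr hpr => (h1 pr hpr).1
  suffices hmain : ∀ n, ∀ s : List Char, s.length = n → (∀ b ∈ bad, ¬ b <:+: s) →
      pvApply pairs s = pvScan pairs s.length s by
    intro s; exact hmain s.length s rfl
  intro n
  induction n using Nat.strong_induction_on with
  | _ n ih =>
  intro s hn hbadfree
  cases hfind : pairs.find? (fun pr => pr.1.isPrefixOf s) with
  | none =>
    have hmiss : ∀ pr ∈ pairs, ¬ pr.1 <+: s := by
      intro pr hpr hp
      exact List.find?_eq_none.mp hfind pr hpr (List.isPrefixOf_iff_prefix.mpr hp)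
    cases s with
    | nil =>
      rw [pvApply_nil pairs hne]
      rfl
    | cons c t =>
      rw [pvL1 H pairs h1 h2 c pairs (fun x hx => hx) t hmiss]
      simp only [List.length_cons, pvScan, hfind]
      congr 1
      apply ih t.length (by simp only [List.length_cons] at hn; omega) t rfl
      intro b hb hinf
      exact hbadfree b hb (hinf.trans (List.suffix_cons c t).isInfix)
  | some pr =>
    obtain ⟨P₁, P₂, hsplit, hfalse⟩ := pvFindSplit _ pairs pr hfind
    have hpr : pr ∈ pairs := List.mem_of_find?_eq_some hfind
    have hpk : pr.1 ≠ [] := hne pr hpr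
    have hps := List.find?_some hfind
    simp only at hps
    have hprefix : pr.1 <+: s := List.isPrefixOf_iff_prefix.mp hps
    obtain ⟨u, hu⟩ := hprefix
    have hpklen : 1 ≤ pr.1.length := by
      cases h : pr.1 with
      | nil => exact absurd h hpk
      | cons _ _ => simp
    have hAapp : pvApply pairs s = pvApply (pr :: P₂) (pvApply P₁ s) := by
      conv_lhs => rw [hsplit]
      simp [pvApply, List.foldl_append]
    have hRP₁ : ∀ x ∈ P₁, pvRcond bad x.1 pr.1 := by
      intro x hx
      rw [hsplit] at hP
      exact (List.pairwise_append.mp hP).2.2 x hx pr (by simp)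
    have hm0 : ∀ x ∈ P₁, ¬ x.1 <+: pr.1 := by
      intro x hx hp
      have := hfalse x hx
      rw [Bool.eq_false_iff] at this
      exact this (List.isPrefixOf_iff_prefix.mpr (hp.trans ⟨u, hu⟩))
    have hmemP₁ : ∀ x ∈ P₁, x ∈ pairs := by
      intro x hx; rw [hsplit]; exact List.mem_append_left _ hx
    have hbadu : ∀ b ∈ bad, ¬ b <:+: u := by
      intro b hb hinf
      exact hbadfree b hb (hinf.trans (List.IsSuffix.isInfix ⟨pr.1, hu⟩))
    have hstep1 : pvApply P₁ s = pr.1 ++ pvApply P₁ u := by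
      rw [← hu]
      apply pvL2a H pairs bad h1 h2 pr.1 P₁ hmemP₁ hRP₁ hm0 u
      rintro x hx i hilt hipos ⟨hdp, hdrop⟩
      have hbadmem := ((hRP₁ x hx).2 i hilt hipos).2 hdp
      apply hbadfree _ hbadmem
      rw [← hu]
      obtain ⟨w, hw⟩ := hdrop
      exact List.IsPrefix.isInfix ⟨w, by rw [List.append_assoc, hw]⟩
    have hmemP₂ : ∀ x ∈ P₂, x ∈ pairs := by
      intro x hx; rw [hsplit]; exact List.mem_append_right _ (by simp [hx])
    have hstep2 : ∀ w, pvApply (pr :: P₂) (pr.1 ++ w) =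
        pr.2 ++ pvApply P₂ (PySem.Chars.replace w pr.1 pr.2) := by
      intro w
      have step : pvApply (pr :: P₂) (pr.1 ++ w) =
          pvApply P₂ (PySem.Chars.replace (pr.1 ++ w) pr.1 pr.2) := rfl
      rw [step, pvReplace_hit pr.1 pr.2 _ hpk (List.prefix_append _ _), List.drop_left]
      rw [pvSegHeadF P₂ (fun x hx => hne x (hmemP₂ x hx)) pr.2 _
        (fun x hx c hc => h3 pr hpr c hc x (hmemP₂ x hx))]
    have hAall : pvApply pairs s = pr.2 ++ pvApply pairs u := by
      rw [hAapp, hstep1, hstep2]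
      congr 1
      conv_rhs => rw [hsplit]
      simp [pvApply, List.foldl_append]
    have hIH : pvApply pairs u = pvScan pairs u.length u := by
      apply ih u.length ?_ u rfl hbadu
      have : pr.1.length + u.length = s.length := by
        rw [← hu]; simp
      omega
    cases hs : s with
    | nil =>
      rw [hs] at hu
      exact absurd (List.append_eq_nil_iff.mp hu).1 hpk
    | cons c t =>
      rw [hs] at hfind hu
      have hdrop : (c :: t).drop pr.1.length = u := by
        rw [← hu, List.drop_left]
      simp only [List.length_cons, pvScan, hfind]
      rw [hs] at hAall
      rw [hAall, hdrop]
      congr 1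
      rw [hIH]
      have hulen : u.length ≤ t.length := by
        have : pr.1.length + u.length = t.length + 1 := by
          rw [← List.length_append, hu]; simp
        omega
      rw [pvScan_fuel pairs hne t.length t.length le_rfl u hulen]


def pvRcondB (bad : List (List Char)) (x y : List Char) : Bool :=
  (!(y.isPrefixOf x)) &&
  (List.range y.length).all fun i =>
    (i == 0) ||
    ((!(x.isPrefixOf (y.drop i))) &&
     ((!((y.drop i).isPrefixOf x)) || bad.contains (y ++ x.drop (y.length - i))))

theorem pvRcondB_sound (bad : List (List Char)) (x y : List Char)
    (h : pvRcondB bad x y = true) : pvRcond bad x y := by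
  unfold pvRcondB at h
  rw [Bool.and_eq_true, List.all_eq_true] at h
  obtain ⟨hpre, hall⟩ := h
  constructor
  · intro hp
    rw [Bool.not_eq_eq_eq_not, Bool.not_true] at hpre
    exact absurd (List.isPrefixOf_iff_prefix.mpr hp) (by simp [hpre])
  · intro i hi hpos
    have := hall i (List.mem_range.mpr hi)
    rw [Bool.or_eq_true, Bool.and_eq_true, Bool.or_eq_true] at this
    rcases this with h0 | ⟨hnp, hrest⟩
    · exact absurd (by simpa using h0) (by omega)
    constructor
    · intro hp
      rw [Bool.not_eq_eq_eq_not, Bool.not_true] at hnp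
      exact absurd (List.isPrefixOf_iff_prefix.mpr hp) (by simp [hnp])
    · intro hp
      rcases hrest with hnp2 | hmem
      · rw [Bool.not_eq_eq_eq_not, Bool.not_true] at hnp2
        exact absurd (List.isPrefixOf_iff_prefix.mpr hp) (by simp [hnp2])
      · exact List.contains_iff_mem.mp hmem

def pvPWB (bad : List (List Char)) : List (List Char × List Char) → Bool
  | [] => true
  | x :: L => L.all (fun y => pvRcondB bad x.1 y.1) && pvPWB bad L

theorem pvPWB_sound (bad : List (List Char)) :
    ∀ L, pvPWB bad L = true → L.Pairwise (fun a b => pvRcond bad a.1 b.1) := by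
  intro L
  induction L with
  | nil => intro _; exact List.Pairwise.nil
  | cons x L ih =>
    intro h
    rw [pvPWB, Bool.and_eq_true, List.all_eq_true] at h
    exact List.Pairwise.cons (fun y hy => pvRcondB_sound _ _ _ (h.1 y hy)) (ih h.2)

def pvH1B (H : List Char) (pairs : List (List Char × List Char)) : Bool :=
  pairs.all fun pr =>
    (!pr.1.isEmpty) && (match pr.2.head? with | some h => H.contains h | none => false)

theorem pvH1B_sound (H : List Char) (pairs : List (List Char × List Char))
    (h : pvH1B H pairs = true) :
    ∀ pr ∈ pairs, pr.1 ≠ [] ∧ ∃ hh ∈ H, pr.2.head? = some hh := by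
  intro pr hpr
  rw [pvH1B, List.all_eq_true] at h
  have := h pr hpr
  rw [Bool.and_eq_true] at this
  obtain ⟨h1, h2⟩ := this
  refine ⟨by simpa using h1, ?_⟩
  cases hh : pr.2.head? with
  | none => rw [hh] at h2; simp at h2
  | some c =>
    rw [hh] at h2
    exact ⟨c, List.contains_iff_mem.mp h2, rfl⟩

def pvH2B (H : List Char) (pairs : List (List Char × List Char)) : Bool :=
  pairs.all fun pr => pr.1.all fun c => !H.contains c

theorem pvH2B_sound (H : List Char) (pairs : List (List Char × List Char))
    (h : pvH2B H pairs = true) :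
    ∀ pr ∈ pairs, ∀ c ∈ pr.1, c ∉ H := by
  intro pr hpr c hc hmem
  rw [pvH2B, List.all_eq_true] at h
  have := h pr hpr
  rw [List.all_eq_true] at this
  have := this c hc
  rw [Bool.not_eq_eq_eq_not, Bool.not_true] at this
  rw [List.contains_iff_mem.mpr hmem] at this
  simp at this

def pvH3B (pairs : List (List Char × List Char)) : Bool :=
  pairs.all fun pr => pr.2.all fun c => pairs.all fun qr => qr.1.head? != some c

theorem pvH3B_sound (pairs : List (List Char × List Char))
    (h : pvH3B pairs = true) :
    ∀ pr ∈ pairs, ∀ c ∈ pr.2, ∀ qr ∈ pairs, qr.1.head? ≠ some c := by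
  intro pr hpr c hc qr hqr
  rw [pvH3B, List.all_eq_true] at h
  have h' := h pr hpr
  rw [List.all_eq_true] at h'
  have h'' := h' c hc
  rw [List.all_eq_true] at h''
  simpa using h'' qr hqr

-- Source B's generated table evaluates to the very same 19 pairs as A's literal list
set_option maxRecDepth 4096 in
theorem pvBuildTable_eq : pvBuildTable = pvTags := by decide

def pvTblF : List (List Char × List Char) := pvTags.map (fun x => (x.1.toList, x.2.toList))
def pvTblT : List (List Char × List Char) := pvTags.map (fun x => (x.2.toList, x.1.toList))
def pvBadChars : List (List Char) := pvBad.map String.toList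

set_option maxRecDepth 4096 in
theorem pvFactsF :
    (pvH1B ['[', ' '] pvTblF && pvH2B ['[', ' '] pvTblF && pvH3B pvTblF && pvPWB [] pvTblF) = true := by
  decide

set_option maxRecDepth 4096 in
theorem pvFactsT :
    (pvH1B ['<'] pvTblT && pvH2B ['<'] pvTblT && pvH3B pvTblT && pvPWB pvBadChars pvTblT) = true := by
  decide

-- A's string-level fold computes the char-level fold of replaces
theorem pvA_toList (direction : String) :
    ∀ (L : List (String × String)) (s : String),
      (L.foldl (fun s x => if direction == "FromHTML" then PySem.Str.replace s x.1 x.2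
                           else PySem.Str.replace s x.2 x.1) s).toList =
      pvApply (if direction == "FromHTML" then L.map (fun x => (x.1.toList, x.2.toList))
               else L.map (fun x => (x.2.toList, x.1.toList))) s.toList := by
  intro L
  induction L with
  | nil =>
    intro s
    by_cases hd : (direction == "FromHTML") = true <;> simp [hd, pvApply]
  | cons x L ih =>
    intro s
    by_cases hd : (direction == "FromHTML") = true
    · simp only [hd, if_true, List.foldl_cons, List.map_cons]
      have h2 := ih (PySem.Str.replace s x.1 x.2)
      simp only [hd, if_true] at h2
      rw [h2, PySem.Str.toList_replace]
      rfl
    · simp only [hd, Bool.false_eq_true, if_false, List.foldl_cons, List.map_cons]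
      have h2 := ih (PySem.Str.replace s x.2 x.1)
      simp only [hd, Bool.false_eq_true, if_false] at h2
      rw [h2, PySem.Str.toList_replace]
      rfl

-- ===== VERDICT (by name: the statement is the Claim_ definition above) =====
theorem swapScript_spec : Claim_equal_swapScript := by
  intro s d _hdom hpre
  unfold Spec_swapScript
  rw [← String.toList_inj]
  unfold swapScript swapScript_alt
  rw [pvA_toList d pvTags s, pvBuildTable_eq]
  by_cases hd : (d == "FromHTML") = true
  · simp only [hd, if_true, bne, Bool.not_true, Bool.false_eq_true, if_false]
    have hF := pvFactsF
    simp only [Bool.and_eq_true] at hF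
    have hmain := pvMain ['[', ' '] pvTblF []
      (pvH1B_sound _ _ hF.1.1.1) (pvH2B_sound _ _ hF.1.1.2) (pvH3B_sound _ hF.1.2)
      (pvPWB_sound _ _ hF.2) s.toList (fun b hb => absurd hb (List.not_mem_nil))
    have htl : (String.ofList (pvScan (pvTags.map fun x => (x.1.toList, x.2.toList))
        s.toList.length s.toList)).toList =
        pvScan (pvTags.map fun x => (x.1.toList, x.2.toList)) s.toList.length s.toList := by
      simp
    rw [htl]
    exact hmain
  · simp only [hd, Bool.false_eq_true, if_false, bne, Bool.not_false, if_true]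
    have hdne : d ≠ "FromHTML" := by
      intro h; subst h; simp at hd
    have hforall : ∀ b ∈ pvBad, PySem.Str.isIn b s = false := by
      rcases hpre with h | h
      · exact absurd h hdne
      · exact h
    have hbadfree : ∀ bc ∈ pvBadChars, ¬ bc <:+: s.toList := by
      intro bc hbc hinf
      obtain ⟨b, hb, rfl⟩ := List.mem_map.mp hbc
      have h1 : PySem.Str.isIn b s = true := by
        simp only [PySem.Str.isIn_eq]
        exact (PySem.Chars.isIn_iff_infix b.toList s.toList).mpr hinf
      rw [hforall b hb] at h1
      simp at h1
    have hT := pvFactsT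
    simp only [Bool.and_eq_true] at hT
    have hmain := pvMain ['<'] pvTblT pvBadChars
      (pvH1B_sound _ _ hT.1.1.1) (pvH2B_sound _ _ hT.1.1.2) (pvH3B_sound _ hT.1.2)
      (pvPWB_sound _ _ hT.2) s.toList hbadfree
    have htl : (String.ofList (pvScan (pvTags.map fun x => (x.2.toList, x.1.toList))
        s.toList.length s.toList)).toList =
        pvScan (pvTags.map fun x => (x.2.toList, x.1.toList)) s.toList.length s.toList := by
      simp
    rw [htl]
    exact hmain
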